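-- pv_equiv track=rewrite | github.com/mustafasencer/AlgorithmDataStructureWithGraphviz | algorithms/arrays/partition_array_into_three_parts_with_equal_sum.py | solution
-- ===== SOURCE A (Python) =====
-- def solution(A) -> bool:
--     average = sum(A) // 3
--     remainder = sum(A) % 3
--     count = 0
--     part = 0
--     for a in A:
--         part += a
--         if part == average:
--             count += 1
--             part = 0
--
--     return not remainder and count >= 3
-- ===== SOURCE B (Python) =====
-- def solution(A) -> bool:
--     total = sum(A)
--     if total % 3:
--         return False
--     target = total // 3
--     prefix = 0
--     found_first = False
--     for i, a in enumerate(A):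
--         prefix += a
--         if not found_first:
--             if prefix == target:
--                 found_first = True
--         elif prefix == 2 * target and i < len(A) - 1:
--             return True
--     return False
-- ===== Notes on version B (the rewrite author's own statement) =====
-- stated objective: idiomatic
-- what changed: B replaces A's count-all-equal-sum-segments pass (greedy counter tested against count >= 3 at the end) with a two-boundary prefix-sum walk: after the divisibility guard it waits for the running sum to first hit target, then early-returns True at the first later hit of 2*target before the last index.
import Mathlib
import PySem

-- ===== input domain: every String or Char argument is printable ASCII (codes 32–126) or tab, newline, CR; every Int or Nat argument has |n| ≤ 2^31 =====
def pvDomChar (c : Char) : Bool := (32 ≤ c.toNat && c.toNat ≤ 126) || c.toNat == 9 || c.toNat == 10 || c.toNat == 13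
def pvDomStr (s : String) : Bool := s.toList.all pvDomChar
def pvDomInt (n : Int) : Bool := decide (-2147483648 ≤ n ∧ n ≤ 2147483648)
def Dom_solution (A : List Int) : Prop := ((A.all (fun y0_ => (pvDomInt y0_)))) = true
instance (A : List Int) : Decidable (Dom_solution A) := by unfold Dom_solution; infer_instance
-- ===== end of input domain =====

-- B replaces A's segment-counting pass by a two-boundary prefix-sum walk with early return (idiomatic; same cost).

-- ===== PORT A =====
-- loop body of A's for-loop: part += a; if part == average: count += 1; part = 0
def solutionStep (average : Int) (s : Int × Int) (a : Int) : Int × Int :=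
  let part := s.2 + a
  if part = average then (s.1 + 1, 0) else (s.1, part)

def solution (A : List Int) : Bool :=
  let average := PySem.Int.floordiv A.sum 3
  let remainder := PySem.Int.mod A.sum 3
  let st := A.foldl (solutionStep average) (0, 0)
  decide (remainder = 0) && decide ((3:Int) ≤ st.1)

-- ===== PORT B =====
-- B's for-loop with early return: i is the current index, pfx the running sum, found the found_first flag
def altGo (n t : Int) : List Int → Int → Int → Bool → Bool
  | [], _, _, _ => false
  | a :: rest, i, pfx, found =>
    let pfx' := pfx + a
    if found = false then
      if pfx' = t then altGo n t rest (i + 1) pfx' true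
      else altGo n t rest (i + 1) pfx' false
    else if pfx' = 2 * t ∧ i < n - 1 then true
    else altGo n t rest (i + 1) pfx' found

def solution_alt (A : List Int) : Bool :=
  let total := A.sum
  if PySem.Int.mod total 3 ≠ 0 then false
  else altGo (A.length : Int) (PySem.Int.floordiv total 3) A 0 0 false

-- ===== PRECONDITION & SPEC =====
def Spec_solution (A : List Int) (out : Bool) : Prop := out = solution_alt A
instance (A : List Int) (out : Bool) : Decidable (Spec_solution A out) := by unfold Spec_solution; infer_instance

-- ===== CLAIM (what is proved, stated in full; the proofs are below) =====
def Claim_equal_solution : Prop := ∀ (A : List Int), Dom_solution A → Spec_solution A (solution A)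

-- ===== LEMMAS AND PROOFS =====

-- the greedy counter never decreases
theorem count_mono (t : Int) (l : List Int) (c p : Int) :
    c ≤ (l.foldl (solutionStep t) (c, p)).1 := by
  induction l generalizing c p with
  | nil => simp
  | cons a rest ih =>
    simp only [List.foldl, solutionStep]
    split
    · exact le_trans (by omega) (ih (c + 1) 0)
    · exact ih c (p + a)

-- if the remaining elements bring the part exactly to t, the counter gains at least one
theorem count_reach (t : Int) (l : List Int) (c p : Int)
    (hs : p + l.sum = t) (hne : l ≠ []) :
    c + 1 ≤ (l.foldl (solutionStep t) (c, p)).1 := by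
  induction l generalizing c p with
  | nil => exact absurd rfl hne
  | cons a rest ih =>
    simp only [List.foldl, solutionStep]
    split
    · exact count_mono t rest (c + 1) 0
    · rcases rest with _ | ⟨b, rest'⟩
      · simp at hs; simp_all
      · exact ih (c) (p + a) (by simp at hs ⊢; omega) (by simp)

-- found phase: B is looking for prefix = 2t; greedy state is (1, pfx - t)
theorem phase1 (n t : Int) (l : List Int) (i pfx : Int)
    (hsum : pfx + l.sum = 3 * t) (hlen : i + (l.length : Int) = n) :
    altGo n t l i pfx true = decide ((3:Int) ≤ (l.foldl (solutionStep t) (1, pfx - t)).1) := by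
  induction l generalizing i pfx with
  | nil => simp [altGo]
  | cons a rest ih =>
    simp only [altGo, List.foldl]
    have hlen' : (i + 1) + (rest.length : Int) = n := by
      simp at hlen; omega
    have hsum' : (pfx + a) + rest.sum = 3 * t := by simp at hsum; omega
    by_cases h2 : pfx + a = 2 * t ∧ i < n - 1
    · rw [if_neg (by simp), if_pos h2]
      have hrne : rest ≠ [] := by
        rcases rest with _ | _
        · exfalso; simp at hlen'; omega
        · simp
      have hstep : solutionStep t (1, pfx - t) a = (2, 0) := by
        simp only [solutionStep]; rw [if_pos (by omega : pfx - t + a = t)]; norm_num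
      simp only [hstep]
      have := count_reach t rest 2 0 (by omega) hrne
      simp; omega
    · rw [if_neg (by simp), if_neg h2]
      by_cases hp : pfx + a = 2 * t
      · -- then ¬ i < n - 1, so rest = []
        have hi : ¬ i < n - 1 := fun h => h2 ⟨hp, h⟩
        have hr0 : rest = [] := by
          rcases rest with _ | ⟨b, rest'⟩
          · rfl
          · exfalso; simp at hlen'; omega
        subst hr0
        have hstep : solutionStep t (1, pfx - t) a = (2, 0) := by
          simp only [solutionStep]; rw [if_pos (by omega : pfx - t + a = t)]; norm_num
        simp [altGo, hstep]
      · have hstep : solutionStep t (1, pfx - t) a = (1, pfx - t + a) := by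
          simp only [solutionStep]; rw [if_neg (by omega : ¬ pfx - t + a = t)]
        simp only [hstep]
        have := ih (i + 1) (pfx + a) hsum' hlen'
        have harith : pfx + a - t = pfx - t + a := by ring
        simp only [harith] at this
        exact this

-- search phase: found_first not yet set; greedy state is (0, pfx)
theorem phase0 (n t : Int) (l : List Int) (i pfx : Int)
    (hsum : pfx + l.sum = 3 * t) (hlen : i + (l.length : Int) = n) :
    altGo n t l i pfx false = decide ((3:Int) ≤ (l.foldl (solutionStep t) (0, pfx)).1) := by
  induction l generalizing i pfx with
  | nil => simp [altGo]
  | cons a rest ih =>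
    simp only [altGo, List.foldl]
    have hlen' : (i + 1) + (rest.length : Int) = n := by
      simp at hlen; omega
    have hsum' : (pfx + a) + rest.sum = 3 * t := by simp at hsum; omega
    rw [if_pos trivial]
    by_cases hp : pfx + a = t
    · rw [if_pos hp]
      have hstep : solutionStep t (0, pfx) a = (1, 0) := by
        simp only [solutionStep]; rw [if_pos hp]; norm_num
      simp only [hstep]
      have := phase1 n t rest (i + 1) (pfx + a) hsum' hlen'
      have h0 : pfx + a - t = (0:Int) := by omega
      rw [this]; simp only [h0]
    · rw [if_neg hp]
      have hstep : solutionStep t (0, pfx) a = (0, pfx + a) := by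
        simp only [solutionStep]; rw [if_neg hp]
      simp only [hstep]
      exact ih (i + 1) (pfx + a) hsum' hlen'

-- ===== VERDICT (by name: the statement is the Claim_ definition above) =====
theorem solution_spec : Claim_equal_solution := by
  intro A _
  unfold Spec_solution solution solution_alt
  dsimp only
  by_cases hm : PySem.Int.mod A.sum 3 = 0
  · rw [if_neg (not_not_intro hm)]
    have hmod : A.sum % 3 = 0 := by
      rw [PySem.Int.mod_eq_emod_of_pos (by norm_num)] at hm; exact hm
    have hdiv : PySem.Int.floordiv A.sum 3 = A.sum / 3 :=
      PySem.Int.floordiv_eq_ediv_of_pos (by norm_num)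
    have h3 : 0 + A.sum = 3 * (PySem.Int.floordiv A.sum 3) := by
      rw [hdiv]; omega
    have := phase0 (A.length : Int) (PySem.Int.floordiv A.sum 3) A 0 0 h3 (by simp)
    rw [this, hm]
    simp
  · rw [if_pos hm]
    rw [decide_eq_false hm]
    simp
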